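-- pv_equiv track=rewrite | github.com/BenSchomp/adventofcode2023 | day-06.py | getGoalCount
-- ===== SOURCE A (Python) =====
-- def getGoalCount(time, goal):
--   count = 0
--   t = 1
--   speed = 1
--   while t < time:
--     speed = t
--     distance = (time - t) * speed
--     if distance > goal:
--       count += 1
--     t += 1
--
--   return count
-- ===== SOURCE B (Python) =====
-- def _isqrt(n):
--   # Newton's method integer square root (floor), n >= 0
--   if n <= 1:
--     return n
--   guess = n // 2
--   while True:
--     nxt = (guess + n // guess) // 2
--     if nxt >= guess:
--       return guess
--     guess = nxt
--
-- def getGoalCount(time, goal):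
--   # count t in [1, time) with (time-t)*t > goal, via the quadratic's integer roots
--   if time <= 1:
--     return 0
--   if goal < 0:
--     return time - 1
--   d = time * time - 4 * goal
--   if d <= 0:
--     return 0
--   s = _isqrt(d - 1)            # largest s with s*s < d
--   hi = (time + s) // 2         # floor of larger root region
--   lo = -((s - time) // 2)      # ceil((time - s) / 2)
--   return hi - lo + 1
-- ===== Notes on version B (the rewrite author's own statement) =====
-- stated objective: faster
-- what changed: Replaces A's trial loop over every t in [1,time) by solving the quadratic inequality (time-t)*t > goal: a Newton-iteration integer square root of the discriminant gives the integer endpoints of the passing interval, whose length is returned in closed form.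
import Mathlib
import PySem

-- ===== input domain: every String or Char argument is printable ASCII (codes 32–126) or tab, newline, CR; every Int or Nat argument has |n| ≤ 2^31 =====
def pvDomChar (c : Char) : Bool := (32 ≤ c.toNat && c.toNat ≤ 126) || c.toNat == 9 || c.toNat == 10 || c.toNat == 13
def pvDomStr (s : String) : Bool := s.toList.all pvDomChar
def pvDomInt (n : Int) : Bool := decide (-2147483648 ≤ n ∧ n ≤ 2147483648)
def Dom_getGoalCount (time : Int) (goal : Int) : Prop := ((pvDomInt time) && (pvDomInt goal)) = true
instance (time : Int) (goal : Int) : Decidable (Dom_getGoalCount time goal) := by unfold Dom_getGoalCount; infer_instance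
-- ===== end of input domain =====

-- B replaces A's trial loop over every t by solving the quadratic inequality
-- (time-t)*t > goal: a Newton-iteration integer square root gives the integer
-- endpoints of the passing interval, whose length is returned directly.

-- ===== PORT A =====
-- the while loop of A: t counts up from 1 while t < time
def getGoalCountAux (time goal t count : Int) : Int :=
  if t < time then
    let speed := t
    let distance := (time - t) * speed
    getGoalCountAux time goal (t + 1) (if distance > goal then count + 1 else count)
  else count
termination_by (time - t).toNat
decreasing_by omega

def getGoalCount (time : Int) (goal : Int) : Int :=
  getGoalCountAux time goal 1 0

-- ===== PORT B =====
-- the while loop of Source B's _isqrt (Newton iteration); _isqrt's argument is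
-- nonnegative at its only call site, so it is carried as a Nat here
def isqrtGo (n guess : Nat) : Nat :=
  let nxt := (guess + n / guess) / 2
  if h : nxt < guess then isqrtGo n nxt else guess
termination_by guess
decreasing_by exact h

-- Source B's _isqrt
def isqrtNat (n : Nat) : Nat :=
  if n ≤ 1 then n else isqrtGo n (n / 2)

def getGoalCount_alt (time : Int) (goal : Int) : Int :=
  if time ≤ 1 then 0
  else if goal < 0 then time - 1
  else
    let d := time * time - 4 * goal
    if d ≤ 0 then 0
    else
      let s : Int := (isqrtNat (d - 1).toNat : Int)  -- d - 1 ≥ 0 here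
      let hi := PySem.Int.floordiv (time + s) 2
      let lo := -(PySem.Int.floordiv (s - time) 2)
      hi - lo + 1

-- ===== PRECONDITION & SPEC =====
def Spec_getGoalCount (time : Int) (goal : Int) (out : Int) : Prop := out = getGoalCount_alt time goal
instance (time : Int) (goal : Int) (out : Int) : Decidable (Spec_getGoalCount time goal out) := by unfold Spec_getGoalCount; infer_instance

-- ===== CLAIM (what is proved, stated in full; the proofs are below) =====
def Claim_equal_getGoalCount : Prop := ∀ (time : Int) (goal : Int), Dom_getGoalCount time goal → Spec_getGoalCount time goal (getGoalCount time goal)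

-- ===== LEMMAS AND PROOFS =====

-- Source B's Newton loop is exactly core's Nat.sqrt.iter
theorem isqrtGo_eq_iter (n guess : Nat) : isqrtGo n guess = Nat.sqrt.iter n guess := by
  induction guess using Nat.strong_induction_on with
  | _ g ih =>
    rw [isqrtGo, Nat.sqrt.iter]
    split
    · next h => rw [ih _ h]
    · rfl

theorem isqrt_guess (n : Nat) (h : ¬ n ≤ 1) : n < (n / 2 + 1) * (n / 2 + 1) := by
  have h2 := Nat.div_add_mod n 2
  have h3 : 1 ≤ n / 2 := by omega
  nlinarith [Nat.mod_lt n (show 0 < 2 by norm_num)]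

theorem isqrtNat_sq_le (n : Nat) : isqrtNat n * isqrtNat n ≤ n := by
  unfold isqrtNat
  split
  · next h => interval_cases n <;> simp
  · rw [isqrtGo_eq_iter]; exact Nat.sqrt.iter_sq_le n (n / 2)

theorem lt_isqrtNat_succ_sq (n : Nat) : n < (isqrtNat n + 1) * (isqrtNat n + 1) := by
  unfold isqrtNat
  split
  · next h => interval_cases n <;> simp
  · next h =>
    rw [isqrtGo_eq_iter]
    exact Nat.sqrt.lt_iter_succ_sq n (n / 2) (isqrt_guess n h)

-- A's loop adds, for the integers of [t, time), the indicator of the passing set;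
-- when that set (within [1, time)) is the interval [lo, hi], the result is its length
theorem aux_count (time goal lo hi : Int) (hlo : 1 ≤ lo) (hhi : hi ≤ time - 1)
    (hchar : ∀ x : Int, 1 ≤ x → x < time → ((time - x) * x > goal ↔ (lo ≤ x ∧ x ≤ hi)))
    (t c : Int) (ht : 1 ≤ t) :
    getGoalCountAux time goal t c = c + max 0 (hi + 1 - max t lo) := by
  rw [getGoalCountAux]
  split
  · next h =>
    rw [aux_count time goal lo hi hlo hhi hchar (t + 1) _ (by omega)]
    have hP := hchar t ht h
    split
    · next hp => have := hP.mp hp; omega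
    · next hp => have : ¬ (lo ≤ t ∧ t ≤ hi) := fun hx => hp (hP.mpr hx); omega
  · next h => omega
termination_by (time - t).toNat
decreasing_by omega

-- the passing set is exactly {x : (2x - time)² < d}, i.e. |2x - time| ≤ s for s = isqrt(d-1)
theorem char_quad (time goal d s x : Int) (hd : d = time * time - 4 * goal) (hs0 : 0 ≤ s)
    (hs1 : s * s ≤ d - 1) (hs2 : d - 1 < (s + 1) * (s + 1)) :
    ((time - x) * x > goal ↔ (-s ≤ 2 * x - time ∧ 2 * x - time ≤ s)) := by
  obtain ⟨p, hp⟩ : ∃ p, (time - x) * x = p := ⟨_, rfl⟩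
  have key : (2 * x - time) * (2 * x - time) = time * time - 4 * p := by rw [← hp]; ring
  rw [hp]
  constructor
  · intro hgt
    constructor
    · by_contra hc
      have hc' : 2 * x - time ≤ -s - 1 := by omega
      have hsq : (s + 1) * (s + 1) ≤ (2 * x - time) * (2 * x - time) := by nlinarith
      linarith
    · by_contra hc
      have hc' : s + 1 ≤ 2 * x - time := by omega
      have hsq : (s + 1) * (s + 1) ≤ (2 * x - time) * (2 * x - time) := by nlinarith
      linarith
  · intro ⟨ha, hb⟩
    have hsq : (2 * x - time) * (2 * x - time) ≤ s * s := by nlinarith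
    omega

-- ===== VERDICT (by name: the statement is the Claim_ definition above) =====
theorem getGoalCount_spec : Claim_equal_getGoalCount := by
  unfold Claim_equal_getGoalCount Spec_getGoalCount
  intro time goal _hdom
  unfold getGoalCount getGoalCount_alt
  by_cases h1 : time ≤ 1
  · rw [if_pos h1, getGoalCountAux, if_neg (by omega)]
  rw [if_neg h1]
  by_cases h2 : goal < 0
  · rw [if_pos h2]
    rw [aux_count time goal 1 (time - 1) (by omega) (by omega)
      (fun x hx1 hx2 => by
        constructor
        · intro _; exact ⟨hx1, by omega⟩
        · intro _
          have hm : (1 : Int) * 1 ≤ (time - x) * x :=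
            mul_le_mul (by omega) hx1 (by omega) (by omega)
          linarith) 1 0 le_rfl]
    omega
  rw [if_neg h2]
  by_cases h3 : time * time - 4 * goal ≤ 0
  · rw [if_pos h3]
    rw [aux_count time goal 1 0 (by omega) (by omega)
      (fun x hx1 hx2 => by
        constructor
        · intro hgt
          exfalso
          obtain ⟨p, hp⟩ : ∃ p, (time - x) * x = p := ⟨_, rfl⟩
          have key : (2 * x - time) * (2 * x - time) = time * time - 4 * p := by
            rw [← hp]; ring
          have hnn := mul_self_nonneg (2 * x - time)
          rw [hp] at hgt
          linarith
        · intro hx; omega) 1 0 le_rfl]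
    omega
  rw [if_neg h3]
  set d : Int := time * time - 4 * goal with hd
  set s : Int := (isqrtNat (d - 1).toNat : Int) with hsdef
  have hs0 : 0 ≤ s := hsdef ▸ Int.natCast_nonneg _
  have hcast : ((d - 1).toNat : Int) = d - 1 := Int.toNat_of_nonneg (by omega)
  have hs1 : s * s ≤ d - 1 := by
    have := isqrtNat_sq_le (d - 1).toNat
    calc s * s = ((isqrtNat (d - 1).toNat * isqrtNat (d - 1).toNat : Nat) : Int) := by
          push_cast [hsdef]; ring
      _ ≤ ((d - 1).toNat : Int) := by exact_mod_cast this
      _ = d - 1 := hcast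
  have hs2 : d - 1 < (s + 1) * (s + 1) := by
    have := lt_isqrtNat_succ_sq (d - 1).toNat
    calc d - 1 = ((d - 1).toNat : Int) := hcast.symm
      _ < (((isqrtNat (d - 1).toNat + 1) * (isqrtNat (d - 1).toNat + 1) : Nat) : Int) := by
          exact_mod_cast this
      _ = (s + 1) * (s + 1) := by push_cast [hsdef]; ring
  have hst : s < time := by
    by_contra hc
    have hc' : time ≤ s := by omega
    have : time * time ≤ s * s := mul_le_mul hc' hc' (by omega) (by omega)
    omega
  show getGoalCountAux time goal 1 0 =
    PySem.Int.floordiv (time + s) 2 - -PySem.Int.floordiv (s - time) 2 + 1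
  rw [PySem.Int.floordiv_eq_ediv_of_pos (by norm_num),
    PySem.Int.floordiv_eq_ediv_of_pos (by norm_num)]
  rw [aux_count time goal (-((s - time) / 2)) ((time + s) / 2) (by omega) (by omega)
    (fun x hx1 hx2 =>
      (char_quad time goal d s x hd hs0 hs1 hs2).trans (by omega)) 1 0 le_rfl]
  omega
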